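-- pv_equiv track=rewrite | github.com/rogervila/python_carbon | python_carbon/__init__.py | getQuarters
-- ===== SOURCE A (Python) =====
-- def getQuarters(start: int = 1) -> list:
--     months_amount = 12
--     quarter_months_amount = 3
--
--     months = []
--     quarters = []
--
--     for i in range(months_amount):
--         month = start + i
--         if month > months_amount:
--             month = month - months_amount
--
--         months.append(month)
--
--     for i in range(0, months_amount, quarter_months_amount):
--         quarters.append(months[i:i+quarter_months_amount])
--
--     return quarters
-- ===== SOURCE B (Python) =====
-- def getQuarters(start: int = 1) -> list:
--     quarters = []
--     for q in range(4):
--         quarter = []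
--         for j in range(3):
--             month = start + q * 3 + j
--             if month > 12:
--                 month -= 12
--             quarter.append(month)
--         quarters.append(quarter)
--     return quarters
-- ===== Notes on version B (the rewrite author's own statement) =====
-- stated objective: simpler
-- what changed: Drops the intermediate flat 12-month list and the slicing pass; builds each quarter directly with one nested loop computing month = start + q*3 + j with the same one-shot >12 correction.
import Mathlib
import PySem

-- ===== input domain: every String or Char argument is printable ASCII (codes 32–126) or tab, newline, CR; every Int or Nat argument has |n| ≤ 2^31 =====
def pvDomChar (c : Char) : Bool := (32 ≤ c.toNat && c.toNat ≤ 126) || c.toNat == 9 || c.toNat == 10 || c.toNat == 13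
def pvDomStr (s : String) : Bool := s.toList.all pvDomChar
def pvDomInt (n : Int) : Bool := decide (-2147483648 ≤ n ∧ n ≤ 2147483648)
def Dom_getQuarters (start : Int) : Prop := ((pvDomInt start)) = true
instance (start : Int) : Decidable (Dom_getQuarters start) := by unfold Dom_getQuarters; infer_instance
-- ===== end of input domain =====

-- ===== PORT A =====
-- B builds the 4 quarters directly in one nested loop instead of building a flat 12-month
-- list and slicing it; same return values, objective: simpler decomposition.
def getQuarters (start : Int) : List (List Int) :=
  let monthsAmount : Int := 12
  let quarterMonthsAmount : Int := 3
  let months : List Int :=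
    (PySem.List.pyRange 0 monthsAmount 1).foldl (fun months i =>
      let month := start + i
      let month := if month > monthsAmount then month - monthsAmount else month
      months ++ [month]) []
  let quarters : List (List Int) :=
    (PySem.List.pyRange 0 monthsAmount quarterMonthsAmount).foldl (fun quarters i =>
      quarters ++ [PySem.List.slice months (some i) (some (i + quarterMonthsAmount))]) []
  quarters

-- ===== PORT B =====
def getQuarters_alt (start : Int) : List (List Int) :=
  (PySem.List.pyRange 0 4 1).foldl (fun quarters q =>
    let quarter :=
      (PySem.List.pyRange 0 3 1).foldl (fun quarter j =>
        let month := start + q * 3 + j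
        let month := if month > 12 then month - 12 else month
        quarter ++ [month]) []
    quarters ++ [quarter]) []

-- ===== PRECONDITION & SPEC =====
def Spec_getQuarters (start : Int) (out : List (List Int)) : Prop := out = getQuarters_alt start
instance (start : Int) (out : List (List Int)) : Decidable (Spec_getQuarters start out) := by unfold Spec_getQuarters; infer_instance

-- ===== CLAIM (what is proved, stated in full; the proofs are below) =====
def Claim_equal_getQuarters : Prop := ∀ (start : Int), Dom_getQuarters start → Spec_getQuarters start (getQuarters start)

-- ===== LEMMAS AND PROOFS =====

-- ===== VERDICT (by name: the statement is the Claim_ definition above) =====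
theorem getQuarters_spec : Claim_equal_getQuarters := by
  intro start _
  unfold Spec_getQuarters getQuarters getQuarters_alt
  simp [PySem.List.pyRange, PySem.List.slice, PySem.List.clampIdx, List.range_succ]
  ring_nf
  split_ifs <;> simp_all <;> omega
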